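-- pv_equiv track=rewrite | github.com/BrenoColonello/brasilScript | Semana 5/afds/number_afd.py | accepts_numero_literal
-- ===== SOURCE A (Python) =====
-- def accepts_numero_literal(s: str) -> bool:
--     """AFD for regex: \d+(?:\.\d+)?(?:[eE][+-]?\d+)?
--
--     Accepts integers, decimals and scientific notation.
--     """
--     i = 0
--     n = len(s)
--     # At least one digit
--     if i >= n or not s[i].isdigit():
--         return False
--     while i < n and s[i].isdigit():
--         i += 1
--     # optional fractional part
--     if i < n and s[i] == '.':
--         i += 1
--         # must have at least one digit after dot
--         if i >= n or not s[i].isdigit():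
--             return False
--         while i < n and s[i].isdigit():
--             i += 1
--     # optional exponent
--     if i < n and (s[i] == 'e' or s[i] == 'E'):
--         i += 1
--         if i < n and s[i] in ('+', '-'):
--             i += 1
--         # must have at least one digit in exponent
--         if i >= n or not s[i].isdigit():
--             return False
--         while i < n and s[i].isdigit():
--             i += 1
--     # accept only if consumed all
--     return i == n
-- ===== SOURCE B (Python) =====
-- def accepts_numero_literal(s: str) -> bool:
--     # Single-pass DFA: states 0 START, 1 INT, 2 DOT, 3 FRAC, 4 E, 5 SIGN, 6 EXP, 7 dead.
--     st = 0
--     for c in s: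
--         if st == 0:
--             st = 1 if c.isdigit() else 7
--         elif st == 1:
--             st = 1 if c.isdigit() else 2 if c == '.' else 4 if c in 'eE' else 7
--         elif st == 2:
--             st = 3 if c.isdigit() else 7
--         elif st == 3:
--             st = 3 if c.isdigit() else 4 if c in 'eE' else 7
--         elif st == 4:
--             st = 6 if c.isdigit() else 5 if c in '+-' else 7
--         elif st == 5:
--             st = 6 if c.isdigit() else 7
--         elif st == 6:
--             st = 6 if c.isdigit() else 7
--         else:
--             break
--     return st in (1, 3, 6)
-- ===== Notes on version B (the rewrite author's own statement) =====
-- stated objective: idiomatic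
-- what changed: Replaced the index-based sequence of guarded while-loops with a single pass over the string driving one explicit DFA state variable, accepting iff the final state is a digit-run state.
import Mathlib
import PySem

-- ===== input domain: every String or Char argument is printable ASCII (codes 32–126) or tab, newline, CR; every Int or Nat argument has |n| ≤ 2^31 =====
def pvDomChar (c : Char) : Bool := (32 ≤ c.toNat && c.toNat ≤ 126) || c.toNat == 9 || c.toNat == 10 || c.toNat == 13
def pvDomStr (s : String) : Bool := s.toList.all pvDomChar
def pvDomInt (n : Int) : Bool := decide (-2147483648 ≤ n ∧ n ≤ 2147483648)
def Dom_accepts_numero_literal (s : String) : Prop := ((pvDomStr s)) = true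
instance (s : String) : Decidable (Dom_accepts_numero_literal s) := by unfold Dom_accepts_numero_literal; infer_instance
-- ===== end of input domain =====

-- B rewrites A's sequence of guarded while-loops as one pass driving an explicit DFA state; same values everywhere (idiomatic, not faster).

-- ===== PORT A =====
-- each 'while i < n and s[i].isdigit(): i += 1' loop of A, as recursion on the remaining suffix
def pvDropDigits : List Char → List Char
  | [] => []
  | c :: r => if PySem.Chars.isdigit c then pvDropDigits r else c :: r

-- A's code after 'i += 1' past the e/E (sign check, mandatory digit, digit run, 'return i == n')
def pvExpAfterE (l : List Char) : Bool :=
  let l' := match l with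
    | c :: r => if c = '+' ∨ c = '-' then r else c :: r
    | [] => []
  match l' with
  | [] => false
  | d :: t => if PySem.Chars.isdigit d then pvDropDigits (d :: t) = ([] : List Char) else false

-- A's '# optional exponent' block followed by 'return i == n'
def pvExpTail (l : List Char) : Bool :=
  match l with
  | c :: r => if c = 'e' ∨ c = 'E' then pvExpAfterE r else false
  | [] => true

-- A's '# optional fractional part' block onward
def pvFracExpTail (l : List Char) : Bool :=
  match l with
  | [] => pvExpTail []
  | c :: r =>
      if c = '.' then
        match r with
        | [] => false
        | d :: t => if PySem.Chars.isdigit d then pvExpTail (pvDropDigits (d :: t)) else false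
      else pvExpTail (c :: r)

def accepts_numero_literal (s : String) : Bool :=
  match s.toList with
  | [] => false
  | c :: r => if PySem.Chars.isdigit c then pvFracExpTail (pvDropDigits r) else false

-- ===== PORT B =====
-- DFA states: 0 START, 1 INT, 2 DOT, 3 FRAC, 4 E, 5 SIGN, 6 EXP, 7 dead
def pvStep (st : Nat) (c : Char) : Nat :=
  if st = 0 then (if PySem.Chars.isdigit c then 1 else 7)
  else if st = 1 then (if PySem.Chars.isdigit c then 1 else if c = '.' then 2 else if c = 'e' ∨ c = 'E' then 4 else 7)
  else if st = 2 then (if PySem.Chars.isdigit c then 3 else 7)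
  else if st = 3 then (if PySem.Chars.isdigit c then 3 else if c = 'e' ∨ c = 'E' then 4 else 7)
  else if st = 4 then (if PySem.Chars.isdigit c then 6 else if c = '+' ∨ c = '-' then 5 else 7)
  else if st = 5 then (if PySem.Chars.isdigit c then 6 else 7)
  else if st = 6 then (if PySem.Chars.isdigit c then 6 else 7)
  else 7

def accepts_numero_literal_alt (s : String) : Bool :=
  let st := s.toList.foldl pvStep 0
  st = 1 ∨ st = 3 ∨ st = 6

-- ===== PRECONDITION & SPEC =====
def Spec_accepts_numero_literal (s : String) (out : Bool) : Prop := out = accepts_numero_literal_alt s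
instance (s : String) (out : Bool) : Decidable (Spec_accepts_numero_literal s out) := by unfold Spec_accepts_numero_literal; infer_instance

-- ===== CLAIM (what is proved, stated in full; the proofs are below) =====
def Claim_equal_accepts_numero_literal : Prop := ∀ (s : String), Dom_accepts_numero_literal s → Spec_accepts_numero_literal s (accepts_numero_literal s)

-- ===== LEMMAS AND PROOFS =====
def pvAccept (st : Nat) : Bool := st = 1 ∨ st = 3 ∨ st = 6

lemma run7 (l : List Char) : l.foldl pvStep 7 = 7 := by
  induction l with
  | nil => rfl
  | cons c r ih => simpa [pvStep] using ih

lemma run6 (l : List Char) :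
    pvAccept (l.foldl pvStep 6) = decide (pvDropDigits l = ([] : List Char)) := by
  induction l with
  | nil => simp [pvAccept, pvDropDigits]
  | cons c r ih =>
      by_cases h : PySem.Chars.isdigit c
      · simpa [pvStep, pvDropDigits, h] using ih
      · simp [pvStep, pvDropDigits, h, run7, pvAccept]

lemma run4 (l : List Char) : pvAccept (l.foldl pvStep 4) = pvExpAfterE l := by
  cases l with
  | nil => simp [pvAccept, pvExpAfterE]
  | cons c r =>
      by_cases hd : PySem.Chars.isdigit c
      · have hne : ¬ (c = '+' ∨ c = '-') := by
          rintro (rfl | rfl) <;> simp [PySem.Chars.isdigit] at hd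
        simp [pvStep, hd, pvExpAfterE, hne, pvDropDigits]
        exact run6 r
      · by_cases hs : c = '+' ∨ c = '-'
        · -- sign: go to state 5
          cases r with
          | nil => simp [pvStep, hd, hs, pvExpAfterE, pvAccept]
          | cons d t =>
              by_cases hdd : PySem.Chars.isdigit d
              · simp [pvStep, hd, hs, hdd, pvExpAfterE, pvDropDigits]
                exact run6 t
              · simp [pvStep, hd, hs, hdd, pvExpAfterE, run7, pvAccept]
        · simp [pvStep, hd, hs, pvExpAfterE, run7, pvAccept]

lemma run3 (l : List Char) : pvAccept (l.foldl pvStep 3) = pvExpTail (pvDropDigits l) := by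
  induction l with
  | nil => simp [pvAccept, pvDropDigits, pvExpTail]
  | cons c r ih =>
      by_cases hd : PySem.Chars.isdigit c
      · simpa [pvStep, pvDropDigits, hd] using ih
      · by_cases he : c = 'e' ∨ c = 'E'
        · simp [pvStep, pvDropDigits, hd, he, pvExpTail, run4]
        · simp [pvStep, pvDropDigits, hd, he, pvExpTail, run7, pvAccept]

lemma run1 (l : List Char) : pvAccept (l.foldl pvStep 1) = pvFracExpTail (pvDropDigits l) := by
  induction l with
  | nil => simp [pvAccept, pvDropDigits, pvFracExpTail, pvExpTail]
  | cons c r ih =>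
      by_cases hd : PySem.Chars.isdigit c
      · simpa [pvStep, pvDropDigits, hd] using ih
      · by_cases hp : c = '.'
        · subst hp
          cases r with
          | nil => simp [pvStep, hd, pvDropDigits, pvFracExpTail, pvAccept]
          | cons d t =>
              by_cases hdd : PySem.Chars.isdigit d
              · simp [pvStep, hd, hdd, pvDropDigits, pvFracExpTail, run3]
              · simp [pvStep, hd, hdd, pvDropDigits, pvFracExpTail, run7, pvAccept]
        · by_cases he : c = 'e' ∨ c = 'E'
          · have : pvFracExpTail (c :: r) = pvExpAfterE r := by
              rcases he with rfl | rfl <;> simp [pvFracExpTail, pvExpTail]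
            simp [pvStep, pvDropDigits, hd, hp, he, this, run4]
          · have hne : pvFracExpTail (c :: r) = false := by
              simp [pvFracExpTail, hp, pvExpTail, he]
            simp [pvStep, pvDropDigits, hd, hp, he, hne, run7, pvAccept]

-- ===== VERDICT (by name: the statement is the Claim_ definition above) =====
theorem accepts_numero_literal_spec : Claim_equal_accepts_numero_literal := by
  intro s _
  unfold Spec_accepts_numero_literal accepts_numero_literal accepts_numero_literal_alt
  cases h : s.toList with
  | nil => simp
  | cons c r =>
      by_cases hd : PySem.Chars.isdigit c
      · have := run1 r
        simp [hd, pvStep, pvAccept] at this ⊢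
        simpa using this.symm
      · simp [hd, pvStep, run7]
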